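-- pv_equiv track=rewrite | github.com/NathanVaughn/vscode-task-runner | vtr/terminal_task_system.py | _add_all_argument
-- ===== SOURCE A (Python) =====
-- import copy
-- from typing import List, Optional, Tuple, Union
--
-- def _add_all_argument(
--     shell_command_args: List[str], configured_shell_args: List[str]
-- ) -> List[str]:
--     # https://github.com/microsoft/vscode/blob/eef30e7165e19b33daa1e15e92fa34ff4a5df0d3/src/vs/workbench/contrib/tasks/browser/terminalTaskSystem.ts#L1256-L1272
--
--     # converted with ChatGPT
--     combined_shell_args = copy.deepcopy(configured_shell_args)
--     for element in shell_command_args: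
--         should_add_shell_command_arg = all(
--             (arg.lower() != element)
--             or (
--                 (len(configured_shell_args) > index + 1)
--                 and (
--                     not all(
--                         test_arg.startswith("-")
--                         for test_arg in configured_shell_args[index + 1 :]
--                     )
--                 )
--             )
--             for index, arg in enumerate(configured_shell_args)
--         )
--         if should_add_shell_command_arg:
--             combined_shell_args.append(element)
--
--     return combined_shell_args
-- ===== SOURCE B (Python) =====
-- def _add_all_argument(shell_command_args, configured_shell_args):
--     # One reverse pass over configured_shell_args builds the set of lowered args
--     # that "block" addition (those followed only by dash-args), then one pass
--     # over shell_command_args filters against it.  O(m + n) vs A's O(m * n^2).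
--     blocked = set()
--     all_dash = True
--     for arg in reversed(configured_shell_args):
--         if all_dash:
--             blocked.add(arg.lower())
--         all_dash = all_dash and arg.startswith("-")
--     result = list(configured_shell_args)
--     result.extend(e for e in shell_command_args if e not in blocked)
--     return result
-- ===== Notes on version B (the rewrite author's own statement) =====
-- stated objective: faster
-- what changed: Replaces A's per-element scan of configured_shell_args with a nested suffix scan (all(startswith) recomputed for every index) by a single reverse pass that precomputes the set of lowered blocking args, then one filtering pass over shell_command_args.
import Mathlib
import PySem

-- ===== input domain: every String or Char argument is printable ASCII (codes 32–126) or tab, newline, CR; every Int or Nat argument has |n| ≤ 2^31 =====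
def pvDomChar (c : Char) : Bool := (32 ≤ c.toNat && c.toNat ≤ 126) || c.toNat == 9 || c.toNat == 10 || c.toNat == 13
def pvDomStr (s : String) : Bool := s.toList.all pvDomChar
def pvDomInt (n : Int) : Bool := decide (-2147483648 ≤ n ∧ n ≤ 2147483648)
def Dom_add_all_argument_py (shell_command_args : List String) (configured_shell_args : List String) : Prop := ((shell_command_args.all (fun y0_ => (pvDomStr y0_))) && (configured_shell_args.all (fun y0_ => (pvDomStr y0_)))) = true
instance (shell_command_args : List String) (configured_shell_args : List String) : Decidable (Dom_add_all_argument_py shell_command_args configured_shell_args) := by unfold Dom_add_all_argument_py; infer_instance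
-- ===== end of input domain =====

-- B precomputes the set of blocking (lowered) args in one reverse pass instead of A's nested rescans of configured_shell_args; same return value.

-- ===== PORT A =====
def add_all_argument_py (shell_command_args : List String) (configured_shell_args : List String) : List String :=
  shell_command_args.foldl (fun combined_shell_args element =>
    let should_add_shell_command_arg :=
      (PySem.List.enumerate configured_shell_args).all (fun p =>
        (PySem.Str.lower p.2 != element) ||
        (decide ((configured_shell_args.length : Int) > p.1 + 1) &&
         !((PySem.List.slice configured_shell_args (some (p.1 + 1)) none).all
             (fun test_arg => PySem.Str.startswith test_arg "-"))))
    if should_add_shell_command_arg then combined_shell_args ++ [element] else combined_shell_args)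
    configured_shell_args

-- ===== PORT B =====
def add_all_argument_py_alt (shell_command_args : List String) (configured_shell_args : List String) : List String :=
  let st := configured_shell_args.reverse.foldl
    (fun (s : PySem.Set String × Bool) arg =>
      ((if s.2 then PySem.Set.add s.1 (PySem.Str.lower arg) else s.1),
       s.2 && PySem.Str.startswith arg "-"))
    (PySem.Set.empty, true)
  configured_shell_args ++ shell_command_args.filter (fun e => !(PySem.Set.contains st.1 e))

-- ===== PRECONDITION & SPEC =====
def Spec_add_all_argument_py (shell_command_args : List String) (configured_shell_args : List String) (out : List String) : Prop := out = add_all_argument_py_alt shell_command_args configured_shell_args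
instance (shell_command_args : List String) (configured_shell_args : List String) (out : List String) : Decidable (Spec_add_all_argument_py shell_command_args configured_shell_args out) := by unfold Spec_add_all_argument_py; infer_instance

-- ===== CLAIM (what is proved, stated in full; the proofs are below) =====
def Claim_equal_add_all_argument_py : Prop := ∀ (shell_command_args : List String) (configured_shell_args : List String), Dom_add_all_argument_py shell_command_args configured_shell_args → Spec_add_all_argument_py shell_command_args configured_shell_args (add_all_argument_py shell_command_args configured_shell_args)

-- ===== LEMMAS AND PROOFS =====

-- set membership after Set.add, as a Bool equation
lemma contains_add_eq (s : PySem.Set String) (x y : String) :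
    PySem.Set.contains (PySem.Set.add s x) y = (PySem.Set.contains s y || y == x) := by
  simp only [PySem.Set.add, PySem.Set.contains]
  by_cases hc : List.contains s x = true
  · rw [if_pos hc]
    cases hxy : y == x
    · simp
    · have hyx : y = x := by simpa using hxy
      subst hyx
      simp_all
  · rw [if_neg hc]
    simp only [List.contains_append]
    cases hxy : y == x <;> simp_all

-- the "blocked" predicate both programs decide, as a structural recursion on configured_shell_args
def pvBlocked (cfg : List String) (e : String) : Bool :=
  match cfg with
  | [] => false
  | a :: rest =>
      ((PySem.Str.lower a == e) && rest.all (fun t => PySem.Str.startswith t "-")) || pvBlocked rest e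

-- B's reverse fold computes (the set of blocked strings, the all-dash flag)
lemma foldB_spec (cfg : List String) (e : String) :
    (PySem.Set.contains
      (cfg.reverse.foldl
        (fun (s : PySem.Set String × Bool) arg =>
          ((if s.2 then PySem.Set.add s.1 (PySem.Str.lower arg) else s.1),
           s.2 && PySem.Str.startswith arg "-"))
        (PySem.Set.empty, true)).1 e = pvBlocked cfg e)
    ∧ ((cfg.reverse.foldl
        (fun (s : PySem.Set String × Bool) arg =>
          ((if s.2 then PySem.Set.add s.1 (PySem.Str.lower arg) else s.1),
           s.2 && PySem.Str.startswith arg "-"))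
        (PySem.Set.empty, true)).2 = cfg.all (fun t => PySem.Str.startswith t "-")) := by
  induction cfg with
  | nil => simp [PySem.Set.contains, PySem.Set.empty, pvBlocked]
  | cons a rest ih =>
    obtain ⟨ih1, ih2⟩ := ih
    rw [List.reverse_cons, List.foldl_append, List.foldl_cons, List.foldl_nil]
    set q := List.foldl
        (fun (s : PySem.Set String × Bool) arg =>
          ((if s.2 then PySem.Set.add s.1 (PySem.Str.lower arg) else s.1),
           s.2 && PySem.Str.startswith arg "-"))
        (PySem.Set.empty, true) rest.reverse with hqdef
    constructor
    · simp only [pvBlocked]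
      by_cases hd : (rest.all fun t => PySem.Str.startswith t "-") = true
      · rw [if_pos (ih2.trans hd), contains_add_eq, ih1, hd, Bool.and_true]
        cases hbe : (PySem.Str.lower a == e)
        · have hne : e ≠ PySem.Str.lower a := by
            intro h; subst h; simp at hbe
          simp [hne]
        · have h : PySem.Str.lower a = e := by simpa using hbe
          subst h; simp
      · rw [Bool.not_eq_true] at hd
        rw [if_neg (by rw [ih2, hd]; simp), ih1, hd, Bool.and_false, Bool.false_or]
    · rw [ih2, List.all_cons, Bool.and_comm]

-- positional characterisation of pvBlocked
lemma pvBlocked_iff (cfg : List String) (e : String) :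
    pvBlocked cfg e = true ↔
      ∃ k, ∃ h : k < cfg.length, PySem.Str.lower cfg[k] = e ∧
        (cfg.drop (k + 1)).all (fun t => PySem.Str.startswith t "-") = true := by
  induction cfg with
  | nil => simp [pvBlocked]
  | cons a rest ih =>
    simp only [pvBlocked, Bool.or_eq_true, Bool.and_eq_true, beq_iff_eq, ih]
    constructor
    · rintro (⟨h1, h2⟩ | ⟨k, hk, h1, h2⟩)
      · exact ⟨0, by simp, by simpa using h1, by simpa using h2⟩
      · exact ⟨k + 1, by simpa using Nat.succ_lt_succ hk, by simpa using h1, by simpa using h2⟩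
    · rintro ⟨k, hk, h1, h2⟩
      cases k with
      | zero => exact Or.inl ⟨by simpa using h1, by simpa using h2⟩
      | succ k =>
        exact Or.inr ⟨k, by simpa using Nat.lt_of_succ_lt_succ hk, by simpa using h1, by simpa using h2⟩

lemma slice_from_succ (cfg : List String) (k : Nat) :
    PySem.List.slice cfg (some ((k : Int) + 1)) none = cfg.drop (k + 1) := by
  have h : ((k : Int) + 1) = ((k + 1 : Nat) : Int) := by push_cast; ring
  rw [h, PySem.List.slice_from_natCast]

-- A's per-element `all` over enumerate is exactly ¬ pvBlocked
lemma shouldAdd_eq (cfg : List String) (e : String) :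
    ((PySem.List.enumerate cfg).all (fun p =>
        (PySem.Str.lower p.2 != e) ||
        (decide ((cfg.length : Int) > p.1 + 1) &&
         !((PySem.List.slice cfg (some (p.1 + 1)) none).all
             (fun t => PySem.Str.startswith t "-"))))) = !(pvBlocked cfg e) := by
  cases hB : pvBlocked cfg e
  · simp only [Bool.not_false]
    rw [List.all_eq_true]
    intro p hp
    rw [PySem.List.mem_enumerate_iff] at hp
    obtain ⟨k, hk, rfl⟩ := hp
    simp only [zero_add]
    by_cases he : PySem.Str.lower cfg[k] = e
    · have hsl : (cfg.drop (k + 1)).all (fun t => PySem.Str.startswith t "-") = false := by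
        by_contra hc
        rw [Bool.not_eq_false] at hc
        rw [(pvBlocked_iff cfg e).2 ⟨k, hk, he, hc⟩] at hB
        simp at hB
      have hlen : k + 1 < cfg.length := by
        by_contra hge
        have hnil : cfg.drop (k + 1) = [] := List.drop_eq_nil_of_le (by omega)
        rw [hnil] at hsl; simp at hsl
      rw [slice_from_succ, hsl]
      simp
      omega
    · simp [he]
  · simp only [Bool.not_true]
    rw [Bool.eq_false_iff]
    intro hall
    rw [pvBlocked_iff] at hB
    obtain ⟨k, hk, h1, h2⟩ := hB
    rw [List.all_eq_true] at hall
    have hmem : ((k : Int), cfg[k]) ∈ PySem.List.enumerate cfg := by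
      rw [PySem.List.mem_enumerate_iff]; exact ⟨k, hk, by simp⟩
    have hc := hall _ hmem
    rw [slice_from_succ, h2] at hc
    simp [h1] at hc

-- ===== VERDICT (by name: the statement is the Claim_ definition above) =====
theorem add_all_argument_py_spec : Claim_equal_add_all_argument_py := by
  intro sca cfg _
  unfold Spec_add_all_argument_py add_all_argument_py add_all_argument_py_alt
  rw [PySem.List.foldl_append_if]
  simp only [List.map_id']
  congr 1
  apply List.filter_congr
  intro e _
  rw [shouldAdd_eq, (foldB_spec cfg e).1]
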